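-- pv_equiv track=rewrite | github.com/eatingyu0820/USC_CS561_AI | HM2/HM2_stage 1/my_player.py | get_group_count_with_k_liberties
-- ===== SOURCE A (Python) =====
-- def on_board(i, j):
--     if i < 5 and j < 5 and i >= 0 and j >= 0:
--         return True
--     else:
--         return False
--
-- def detect_neighbor(i, j):
--     neighbors = []
--     coordinates = [(0, -1), (0, 1), (1, 0), (-1, 0)]
--     for co in coordinates:
--         new_x = i + co[0]
--         new_y = j + co[1]
--         if on_board(new_x, new_y):
--             neighbors.append((new_x, new_y))
--     return neighbors
--
-- def detect_neighbor_ally(i, j, board, player):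
--     neighbors = detect_neighbor(i, j)
--     group_allies = []
--     for ne in neighbors:
--         if board[ne[0]][ne[1]] == player:
--             group_allies.append(ne)
--     return group_allies
--
-- def all_positions(i, j, board, player):
--     stack = [(i, j)]
--     ally_members = []
--     while stack:
--         piece = stack.pop()
--         ally_members.append(piece)
--         neighbor_allies = detect_neighbor_ally(piece[0], piece[1], board, player)
--         for ally in neighbor_allies:
--             if ally not in stack and ally not in ally_members:
--                 stack.append(ally)
--     return ally_members
--
-- def get_liberty_positions(i, j,board,player):
--     liberties=set()
--     allyMembers = all_positions(i, j,board,player)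
--     for member in allyMembers:
--         neighbors = detect_neighbor(member[0], member[1])
--         for piece in neighbors:
--             if board[piece[0]][piece[1]] == 0:
--                 liberties=liberties|set([piece])
--     return list(liberties)
--
-- def get_group_count_with_k_liberties(board,player,k):
--
--     mine_grps_count = 0
--     opponent_gps_count = 0
--     for i in range(0,5):
--         for j in range(0,5):
--             if board[i][j] ==player:
--                 lib = get_liberty_positions(i,j,board,player)
--                 if len(set(lib)) <= k:
--                     mine_grps_count=mine_grps_count+len(lib)
--             if board[i][j] ==3-player:
--                 lib = get_liberty_positions(i,j,board,3-player)
--                 if len(set(lib)) <= k: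
--                     opponent_gps_count=opponent_gps_count+len(lib)
--     return mine_grps_count,opponent_gps_count
-- ===== SOURCE B (Python) =====
-- def _neighbors(i, j):
--     out = []
--     for (di, dj) in ((0, -1), (0, 1), (1, 0), (-1, 0)):
--         x, y = i + di, j + dj
--         if 0 <= x < 5 and 0 <= y < 5:
--             out.append((x, y))
--     return out
--
-- def _flood(i, j, board, color):
--     # stack flood fill of the group of `color` containing (i, j)
--     stack = [(i, j)]
--     members = []
--     while stack:
--         p = stack.pop()
--         members.append(p)
--         for q in _neighbors(p[0], p[1]):
--             if board[q[0]][q[1]] == color and q not in stack and q not in members: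
--                 stack.append(q)
--     return members
--
-- def get_group_count_with_k_liberties(board, player, k):
--     mine = 0
--     opp = 0
--     visited = set()
--     for i in range(5):
--         for j in range(5):
--             color = board[i][j]
--             if (i, j) in visited:
--                 continue
--             if color != player and color != 3 - player:
--                 continue
--             members = _flood(i, j, board, color)
--             visited.update(members)
--             libs = set()
--             for (x, y) in members:
--                 for q in _neighbors(x, y):
--                     if board[q[0]][q[1]] == 0:
--                         libs.add(q)
--             if len(libs) <= k:
--                 if color == player:
--                     mine += len(libs) * len(members)
--                 else:
--                     opp += len(libs) * len(members)
--     return mine, opp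
-- ===== Notes on version B (the rewrite author's own statement) =====
-- stated objective: alternative
-- what changed: A re-runs a full flood fill and liberty scan from every single stone of every group (once per board cell); B sweeps the board once with a global visited set, flood-fills each group exactly once, and adds liberty_count x group_size per qualifying group.
import Mathlib
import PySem

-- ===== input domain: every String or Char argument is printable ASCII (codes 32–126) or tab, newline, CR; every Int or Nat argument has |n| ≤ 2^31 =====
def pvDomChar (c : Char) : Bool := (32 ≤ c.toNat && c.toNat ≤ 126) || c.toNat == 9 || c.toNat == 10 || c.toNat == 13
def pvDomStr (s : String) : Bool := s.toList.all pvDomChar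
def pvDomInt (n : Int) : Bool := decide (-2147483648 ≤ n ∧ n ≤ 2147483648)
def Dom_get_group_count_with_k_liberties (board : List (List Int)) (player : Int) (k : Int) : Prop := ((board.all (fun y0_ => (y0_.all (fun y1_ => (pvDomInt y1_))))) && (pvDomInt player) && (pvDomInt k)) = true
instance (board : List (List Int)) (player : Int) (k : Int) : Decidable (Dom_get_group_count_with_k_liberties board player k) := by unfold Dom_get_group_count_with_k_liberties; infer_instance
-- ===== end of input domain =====

-- B replaces A's per-stone re-flood-fill (each group recomputed once per member) by a single sweep
-- with a global visited set that flood-fills every group once and adds liberties × group-size.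

-- ===== PORT A =====

def on_board (i j : Int) : Bool := if i < 5 ∧ j < 5 ∧ i ≥ 0 ∧ j ≥ 0 then true else false

def detect_neighbor (i j : Int) : List (Int × Int) :=
  [((0:Int),(-1:Int)), (0,1), (1,0), (-1,0)].foldl (fun ns co =>
    if on_board (i + co.1) (j + co.2) then ns ++ [(i + co.1, j + co.2)] else ns) []

-- board[i][j]; exact under Pre_ (every index used is in range, so the defaults are never taken)
def boardAt (board : List (List Int)) (i j : Int) : Int :=
  PySem.List.pyGetD (PySem.List.pyGetD board i []) j 0

def detect_neighbor_ally (i j : Int) (board : List (List Int)) (player : Int) : List (Int × Int) :=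
  (detect_neighbor i j).foldl (fun g ne =>
    if boardAt board ne.1 ne.2 = player then g ++ [ne] else g) []

-- the 'while stack' loop of all_positions; the stack keeps its top at the HEAD (pop = head,
-- push = cons), which performs exactly Python's pop-from-the-end/append-at-the-end discipline.
-- Fuel 26 is enough: each iteration appends one new cell of the 5×5 board to ally (proved below).
def all_positions_loop (board : List (List Int)) (player : Int) :
    Nat → List (Int × Int) → List (Int × Int) → List (Int × Int)
  | 0, _, ally => ally
  | _ + 1, [], ally => ally
  | fuel + 1, piece :: rest, ally =>
      let ally' := ally ++ [piece]
      let stack' := (detect_neighbor_ally piece.1 piece.2 board player).foldl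
        (fun st a => if a ∉ st ∧ a ∉ ally' then a :: st else st) rest
      all_positions_loop board player fuel stack' ally'

def all_positions (i j : Int) (board : List (List Int)) (player : Int) : List (Int × Int) :=
  all_positions_loop board player 26 [(i, j)] []

def get_liberty_positions (i j : Int) (board : List (List Int)) (player : Int) : List (Int × Int) :=
  (all_positions i j board player).foldl (fun libs member =>
    (detect_neighbor member.1 member.2).foldl (fun l piece =>
      if boardAt board piece.1 piece.2 = 0 then PySem.Set.union l [piece] else l) libs)
    PySem.Set.empty

def get_group_count_with_k_liberties (board : List (List Int)) (player : Int) (k : Int) : Int × Int :=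
  (PySem.List.pyRange 0 5 1).foldl (fun acc i =>
    (PySem.List.pyRange 0 5 1).foldl (fun acc j =>
      let acc :=
        if boardAt board i j = player then
          let lib := get_liberty_positions i j board player
          if ((PySem.Set.ofList lib).length : Int) ≤ k then (acc.1 + (lib.length : Int), acc.2)
          else acc
        else acc
      if boardAt board i j = 3 - player then
        let lib := get_liberty_positions i j board (3 - player)
        if ((PySem.Set.ofList lib).length : Int) ≤ k then (acc.1, acc.2 + (lib.length : Int))
        else acc
      else acc) acc) ((0 : Int), (0 : Int))

-- ===== PORT B =====

def neighbors_b (i j : Int) : List (Int × Int) :=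
  [((0:Int),(-1:Int)), (0,1), (1,0), (-1,0)].foldl (fun out d =>
    if 0 ≤ i + d.1 ∧ i + d.1 < 5 ∧ 0 ≤ j + d.2 ∧ j + d.2 < 5 then out ++ [(i + d.1, j + d.2)]
    else out) []

-- _flood's while loop (same stack discipline as above; fuel 26 suffices the same way)
def flood_loop (board : List (List Int)) (color : Int) :
    Nat → List (Int × Int) → List (Int × Int) → List (Int × Int)
  | 0, _, members => members
  | _ + 1, [], members => members
  | fuel + 1, p :: rest, members =>
      let members' := members ++ [p]
      let stack' := (neighbors_b p.1 p.2).foldl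
        (fun st q => if boardAt board q.1 q.2 = color ∧ q ∉ st ∧ q ∉ members' then q :: st else st)
        rest
      flood_loop board color fuel stack' members'

def flood (i j : Int) (board : List (List Int)) (color : Int) : List (Int × Int) :=
  flood_loop board color 26 [(i, j)] []

def get_group_count_with_k_liberties_alt (board : List (List Int)) (player : Int) (k : Int) :
    Int × Int :=
  let res : PySem.Set (Int × Int) × Int × Int :=
    (PySem.List.pyRange 0 5 1).foldl (fun st i =>
      (PySem.List.pyRange 0 5 1).foldl (fun st j =>
        let color := boardAt board i j
        if (i, j) ∈ st.1 then st
        else if color ≠ player ∧ color ≠ 3 - player then st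
        else
          let members := flood i j board color
          let visited' := PySem.Set.update st.1 members
          let libs : PySem.Set (Int × Int) := members.foldl (fun libs m =>
            (neighbors_b m.1 m.2).foldl (fun l q =>
              if boardAt board q.1 q.2 = 0 then PySem.Set.add l q else l) libs) PySem.Set.empty
          if (libs.length : Int) ≤ k then
            if color = player then
              (visited', st.2.1 + (libs.length : Int) * (members.length : Int), st.2.2)
            else (visited', st.2.1, st.2.2 + (libs.length : Int) * (members.length : Int))
          else (visited', st.2.1, st.2.2)) st)
      (PySem.Set.empty, (0 : Int), (0 : Int))
  (res.2.1, res.2.2)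

-- ===== PRECONDITION & SPEC =====

-- Pre_ excludes exactly the boards on which the Python A raises IndexError: both programs read
-- board[i][j] for all 0 ≤ i, j < 5, so the first five rows must exist and have length ≥ 5.
def Pre_get_group_count_with_k_liberties (board : List (List Int)) (player : Int) (k : Int) : Prop :=
  5 ≤ board.length ∧ ∀ row ∈ board.take 5, 5 ≤ row.length
instance (board : List (List Int)) (player : Int) (k : Int) :
    Decidable (Pre_get_group_count_with_k_liberties board player k) := by
  unfold Pre_get_group_count_with_k_liberties; infer_instance

def pvWitness_get_group_count_with_k_liberties : List (List Int) × Int × Int :=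
  ([[1,0,0,0,0],[0,2,2,0,0],[0,0,1,1,0],[0,0,0,0,0],[2,0,0,0,1]], 1, 2)

def Spec_get_group_count_with_k_liberties (board : List (List Int)) (player : Int) (k : Int) (out : Int × Int) : Prop := out = get_group_count_with_k_liberties_alt board player k
instance (board : List (List Int)) (player : Int) (k : Int) (out : Int × Int) : Decidable (Spec_get_group_count_with_k_liberties board player k out) := by unfold Spec_get_group_count_with_k_liberties; infer_instance

-- ===== CLAIM (what is proved, stated in full; the proofs are below) =====
def Claim_equal_get_group_count_with_k_liberties : Prop := ∀ (board : List (List Int)) (player : Int) (k : Int), Dom_get_group_count_with_k_liberties board player k → Pre_get_group_count_with_k_liberties board player k → Spec_get_group_count_with_k_liberties board player k (get_group_count_with_k_liberties board player k)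

-- ===== LEMMAS AND PROOFS =====

-- ---- basic geometry ----
def inGrid (p : Int × Int) : Prop := 0 ≤ p.1 ∧ p.1 < 5 ∧ 0 ≤ p.2 ∧ p.2 < 5

lemma on_board_iff (x y : Int) : on_board x y = true ↔ (0 ≤ x ∧ x < 5 ∧ 0 ≤ y ∧ y < 5) := by
  simp [on_board]; omega

lemma detect_neighbor_eq (i j : Int) : detect_neighbor i j
    = ([((0:Int),(-1:Int)), (0,1), (1,0), (-1,0)].filter (fun co => on_board (i + co.1) (j + co.2))).map
        (fun co => (i + co.1, j + co.2)) := by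
  unfold detect_neighbor
  rw [PySem.List.foldl_append_if]
  simp

lemma mem_detect_neighbor {q : Int × Int} {i j : Int} :
    q ∈ detect_neighbor i j ↔
      inGrid q ∧ (q = (i, j + -1) ∨ q = (i, j + 1) ∨ q = (i + 1, j) ∨ q = (i + -1, j)) := by
  rw [detect_neighbor_eq]
  simp only [List.mem_map, List.mem_filter, on_board_iff, inGrid, Prod.ext_iff,
    List.mem_cons, List.not_mem_nil, or_false]
  constructor
  · rintro ⟨co, hco, hq⟩
    rcases co with ⟨a, b⟩
    simp_all
    omega
  · rintro ⟨hg, hd⟩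
    rcases hd with ⟨h1, h2⟩ | ⟨h1, h2⟩ | ⟨h1, h2⟩ | ⟨h1, h2⟩
    · exact ⟨(0, -1), by simp; omega, by simp; omega⟩
    · exact ⟨(0, 1), by simp; omega, by simp; omega⟩
    · exact ⟨(1, 0), by simp; omega, by simp; omega⟩
    · exact ⟨(-1, 0), by simp; omega, by simp; omega⟩

lemma inGrid_of_mem_detect_neighbor {q : Int × Int} {i j : Int}
    (h : q ∈ detect_neighbor i j) : inGrid q := (mem_detect_neighbor.1 h).1

lemma detect_neighbor_symm {p q : Int × Int} (hp : inGrid p)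
    (h : q ∈ detect_neighbor p.1 p.2) : p ∈ detect_neighbor q.1 q.2 := by
  rw [mem_detect_neighbor] at h ⊢
  obtain ⟨hg, hd⟩ := h
  refine ⟨hp, ?_⟩
  rcases p with ⟨p1, p2⟩; rcases q with ⟨q1, q2⟩
  simp_all [Prod.ext_iff]
  omega

lemma neighbors_b_eq (i j : Int) : neighbors_b i j = detect_neighbor i j := by
  unfold neighbors_b detect_neighbor
  simp only [List.foldl_cons, List.foldl_nil, on_board_iff]

-- ---- the step relation and reachability ----
def Step (board : List (List Int)) (c : Int) (p q : Int × Int) : Prop :=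
  q ∈ detect_neighbor p.1 p.2 ∧ boardAt board q.1 q.2 = c

def Reach (board : List (List Int)) (c : Int) (s p : Int × Int) : Prop :=
  Relation.ReflTransGen (Step board c) s p

lemma reach_props {board : List (List Int)} {c : Int} {s t : Int × Int}
    (hs : inGrid s) (hcol : boardAt board s.1 s.2 = c) (h : Reach board c s t) :
    inGrid t ∧ boardAt board t.1 t.2 = c ∧ Reach board c t s := by
  induction h with
  | refl => exact ⟨hs, hcol, Relation.ReflTransGen.refl⟩
  | tail _ hstep ih =>
    obtain ⟨hgp, hcp, hback⟩ := ih
    obtain ⟨hmem, hcq⟩ := hstep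
    exact ⟨inGrid_of_mem_detect_neighbor hmem, hcq,
      Relation.ReflTransGen.head ⟨detect_neighbor_symm hgp hmem, hcp⟩ hback⟩

-- ---- the grid ----
def gridList : List (Int × Int) :=
  (PySem.List.pyRange 0 5 1).flatMap (fun i => (PySem.List.pyRange 0 5 1).map (fun j => (i, j)))

lemma mem_gridList {p : Int × Int} : p ∈ gridList ↔ inGrid p := by
  rcases p with ⟨a, b⟩
  simp only [gridList, List.mem_flatMap, List.mem_map, PySem.List.mem_pyRange_one,
    Prod.mk.injEq, inGrid]
  constructor
  · rintro ⟨i, hi, j, hj, h1, h2⟩; simp_all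
  · rintro ⟨h1, h2, h3, h4⟩; exact ⟨a, by omega, b, by omega, rfl, rfl⟩

lemma nodup_gridList : gridList.Nodup := by decide

def gridFinset : Finset (Int × Int) := gridList.toFinset

lemma card_gridFinset : gridFinset.card = 25 := by decide

lemma length_le_25 {l : List (Int × Int)} (hn : l.Nodup) (hg : ∀ p ∈ l, inGrid p) :
    l.length ≤ 25 := by
  have h1 : l.toFinset ⊆ gridFinset := by
    intro x hx
    rw [List.mem_toFinset] at hx
    unfold gridFinset
    rw [List.mem_toFinset, mem_gridList]
    exact hg x hx
  have h2 := Finset.card_le_card h1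
  rw [List.toFinset_card_of_nodup hn, card_gridFinset] at h2
  exact h2

-- ---- the DFS loop ----
lemma push_fold_mono {ally : List (Int × Int)} :
    ∀ (L st : List (Int × Int)) {x}, x ∈ st →
      x ∈ L.foldl (fun st a => if a ∉ st ∧ a ∉ ally then a :: st else st) st := by
  intro L
  induction L with
  | nil => intro st x hx; simpa using hx
  | cons a t ih =>
    intro st x hx
    simp only [List.foldl_cons]
    split_ifs with h
    · exact ih _ (List.mem_cons_of_mem _ hx)
    · exact ih _ hx

lemma push_fold_sub {ally : List (Int × Int)} :
    ∀ (L st : List (Int × Int)) {x},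
      x ∈ L.foldl (fun st a => if a ∉ st ∧ a ∉ ally then a :: st else st) st →
      x ∈ st ∨ x ∈ L := by
  intro L
  induction L with
  | nil => intro st x hx; simp only [List.foldl_nil] at hx; exact Or.inl hx
  | cons a t ih =>
    intro st x hx
    simp only [List.foldl_cons] at hx
    split_ifs at hx with h
    · rcases ih _ hx with h2 | h2
      · rcases List.mem_cons.1 h2 with h3 | h3
        · exact Or.inr (by simp [h3])
        · exact Or.inl h3
      · exact Or.inr (List.mem_cons_of_mem _ h2)
    · rcases ih _ hx with h2 | h2
      · exact Or.inl h2
      · exact Or.inr (List.mem_cons_of_mem _ h2)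

lemma push_fold_covers {ally : List (Int × Int)} :
    ∀ (L st : List (Int × Int)) {x}, x ∈ L →
      x ∈ L.foldl (fun st a => if a ∉ st ∧ a ∉ ally then a :: st else st) st ∨ x ∈ ally := by
  intro L
  induction L with
  | nil => intro st x hx; simp at hx
  | cons a t ih =>
    intro st x hx
    rcases List.mem_cons.1 hx with h1 | h1
    · subst h1
      simp only [List.foldl_cons]
      split_ifs with h
      · exact Or.inl (push_fold_mono t _ (List.mem_cons_self ..))
      · rcases not_and_or.1 h with h2 | h2
        · exact Or.inl (push_fold_mono t _ (not_not.1 h2))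
        · exact Or.inr (not_not.1 h2)
    · simp only [List.foldl_cons]
      split_ifs with h <;> exact ih _ h1

lemma push_fold_nodup {ally : List (Int × Int)} :
    ∀ (L st : List (Int × Int)), (st ++ ally).Nodup →
      ((L.foldl (fun st a => if a ∉ st ∧ a ∉ ally then a :: st else st) st) ++ ally).Nodup := by
  intro L
  induction L with
  | nil => intro st h; simpa using h
  | cons a t ih =>
    intro st h
    simp only [List.foldl_cons]
    split_ifs with hc
    · refine ih _ ?_
      simp only [List.cons_append, List.nodup_cons]
      exact ⟨by simp [hc.1, hc.2], h⟩
    · exact ih _ h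

lemma detect_neighbor_ally_eq (i j : Int) (board : List (List Int)) (c : Int) :
    detect_neighbor_ally i j board c
      = (detect_neighbor i j).filter (fun ne => decide (boardAt board ne.1 ne.2 = c)) := by
  unfold detect_neighbor_ally
  rw [PySem.List.foldl_append_ite_eq_filter]
  simp

lemma mem_detect_neighbor_ally {q : Int × Int} {i j : Int} {board : List (List Int)} {c : Int} :
    q ∈ detect_neighbor_ally i j board c ↔ q ∈ detect_neighbor i j ∧ boardAt board q.1 q.2 = c := by
  rw [detect_neighbor_ally_eq]
  simp [List.mem_filter]

lemma dfs_loop_spec {board : List (List Int)} {c : Int} (s : Int × Int) :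
    ∀ (fuel : Nat) (stack ally : List (Int × Int)),
      (∀ p ∈ stack, Reach board c s p) →
      (∀ p ∈ ally, Reach board c s p) →
      (stack ++ ally).Nodup →
      (∀ p ∈ stack ++ ally, inGrid p) →
      (∀ a ∈ ally, ∀ q, Step board c a q → q ∈ stack ∨ q ∈ ally) →
      26 ≤ fuel + ally.length →
      (all_positions_loop board c fuel stack ally).Nodup ∧
      (∀ p ∈ all_positions_loop board c fuel stack ally, Reach board c s p) ∧
      (∀ p ∈ all_positions_loop board c fuel stack ally, inGrid p) ∧
      (∀ a ∈ all_positions_loop board c fuel stack ally, ∀ q, Step board c a q →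
        q ∈ all_positions_loop board c fuel stack ally) ∧
      (∀ p ∈ stack ++ ally, p ∈ all_positions_loop board c fuel stack ally) := by
  intro fuel
  induction fuel with
  | zero =>
    intro stack ally h1 h2 h3 h4 h5 h6
    exfalso
    have hlen : ally.length ≤ 25 :=
      length_le_25 h3.of_append_right (fun p hp => h4 p (List.mem_append_right _ hp))
    omega
  | succ fuel ih =>
    intro stack ally h1 h2 h3 h4 h5 h6
    cases stack with
    | nil =>
      simp only [all_positions_loop]
      refine ⟨h3.of_append_right, fun p hp => h2 p hp, fun p hp => h4 p (by simpa using hp),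
        fun a ha q hq => ?_, fun p hp => by simpa using hp⟩
      rcases h5 a ha q hq with h | h
      · simp at h
      · exact h
    | cons piece rest =>
      simp only [all_positions_loop]
      set ally' := ally ++ [piece] with hally'
      set nall := detect_neighbor_ally piece.1 piece.2 board c with hnall
      set stack' := nall.foldl (fun st a => if a ∉ st ∧ a ∉ ally' then a :: st else st) rest
        with hstack'
      have hpiece_reach : Reach board c s piece := h1 piece (List.mem_cons_self ..)
      have hmem_ally' : ∀ p ∈ ally', p ∈ ally ∨ p = piece := by
        intro p hp; rw [hally'] at hp; simpa using hp
      have hstack'_sub : ∀ p ∈ stack', p ∈ rest ∨ p ∈ nall := fun p hp => push_fold_sub nall rest hp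
      have hnall_step : ∀ q, q ∈ nall ↔ Step board c piece q := by
        intro q; rw [hnall, mem_detect_neighbor_ally]; exact Iff.rfl
      have h1' : ∀ p ∈ stack', Reach board c s p := by
        intro p hp
        rcases hstack'_sub p hp with h | h
        · exact h1 p (List.mem_cons_of_mem _ h)
        · exact Relation.ReflTransGen.tail hpiece_reach ((hnall_step p).1 h)
      have h2' : ∀ p ∈ ally', Reach board c s p := by
        intro p hp
        rcases hmem_ally' p hp with h | h
        · exact h2 p h
        · exact h ▸ hpiece_reach
      have h3a : (rest ++ ally').Nodup := by
        have heq : rest ++ ally' = (rest ++ ally) ++ [piece] := by simp [hally']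
        rw [heq]
        exact (List.perm_append_singleton _ _).nodup_iff.2 (by simpa using h3)
      have h3' : (stack' ++ ally').Nodup := push_fold_nodup nall rest h3a
      have h4' : ∀ p ∈ stack' ++ ally', inGrid p := by
        intro p hp
        rcases List.mem_append.1 hp with h | h
        · rcases hstack'_sub p h with h | h
          · exact h4 p (by simp [h])
          · exact inGrid_of_mem_detect_neighbor ((hnall_step p).1 h).1
        · rcases hmem_ally' p h with h | h
          · exact h4 p (by simp [h])
          · exact h ▸ h4 piece (by simp)
      have h5' : ∀ a ∈ ally', ∀ q, Step board c a q → q ∈ stack' ∨ q ∈ ally' := by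
        intro a ha q hq
        rcases hmem_ally' a ha with h | h
        · rcases h5 a h q hq with h7 | h7
          · rcases List.mem_cons.1 h7 with h8 | h8
            · exact Or.inr (by simp [hally', h8])
            · exact Or.inl (push_fold_mono nall rest h8)
          · exact Or.inr (by simp [hally', h7])
        · subst h
          exact push_fold_covers nall rest ((hnall_step q).2 hq)
      have h6' : 26 ≤ fuel + ally'.length := by
        have : ally'.length = ally.length + 1 := by simp [hally']
        omega
      obtain ⟨c1, c2, c3, c4, c5⟩ := ih stack' ally' h1' h2' h3' h4' h5' h6'
      refine ⟨c1, c2, c3, c4, fun p hp => ?_⟩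
      rcases List.mem_append.1 hp with h | h
      · rcases List.mem_cons.1 h with h8 | h8
        · exact c5 p (List.mem_append_right _ (by simp [hally', h8]))
        · exact c5 p (List.mem_append_left _ (push_fold_mono nall rest h8))
      · exact c5 p (List.mem_append_right _ (by simp [hally', h]))

lemma all_positions_spec {board : List (List Int)} {c : Int} {s : Int × Int} (hs : inGrid s) :
    (all_positions s.1 s.2 board c).Nodup ∧
    (∀ p, p ∈ all_positions s.1 s.2 board c ↔ Reach board c s p) ∧
    (∀ p ∈ all_positions s.1 s.2 board c, inGrid p) := by
  have h := dfs_loop_spec (board := board) (c := c) s 26 [s] []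
    (by intro p hp; simp at hp; exact hp ▸ Relation.ReflTransGen.refl)
    (by intro p hp; simp at hp)
    (by simp)
    (by intro p hp; simp at hp; exact hp ▸ hs)
    (by intro a ha; simp at ha)
    (by simp)
  have heq : all_positions s.1 s.2 board c = all_positions_loop board c 26 [s] [] := by
    unfold all_positions; rfl
  rw [heq]
  obtain ⟨c1, c2, c3, c4, c5⟩ := h
  refine ⟨c1, fun p => ⟨c2 p, fun hr => ?_⟩, c3⟩
  induction hr with
  | refl => exact c5 s (by simp)
  | tail _ hstep ihr => exact c4 _ ihr _ hstep

lemma members_congr {board : List (List Int)} {c : Int} {s t : Int × Int}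
    (hs : inGrid s) (hcol : boardAt board s.1 s.2 = c)
    (ht : t ∈ all_positions s.1 s.2 board c) :
    ∀ p, p ∈ all_positions t.1 t.2 board c ↔ p ∈ all_positions s.1 s.2 board c := by
  obtain ⟨_, hmem_s, _⟩ := all_positions_spec (board := board) (c := c) hs
  have hreach : Reach board c s t := (hmem_s t).1 ht
  obtain ⟨hgt, _, hback⟩ := reach_props hs hcol hreach
  obtain ⟨_, hmem_t, _⟩ := all_positions_spec (board := board) (c := c) hgt
  intro p
  rw [hmem_t p, hmem_s p]
  exact ⟨fun h => hreach.trans h, fun h => hback.trans h⟩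

-- ---- liberties ----
def libList (board : List (List Int)) (L : List (Int × Int)) : List (Int × Int) :=
  L.foldl (fun libs m =>
    (detect_neighbor m.1 m.2).foldl
      (fun l q => if boardAt board q.1 q.2 = 0 then PySem.Set.add l q else l) libs)
    PySem.Set.empty

lemma lib_inner_mem {board : List (List Int)} {x : Int × Int} :
    ∀ (N : List (Int × Int)) (l : PySem.Set (Int × Int)),
      (x ∈ N.foldl (fun l q => if boardAt board q.1 q.2 = 0 then PySem.Set.add l q else l) l ↔
        x ∈ l ∨ (x ∈ N ∧ boardAt board x.1 x.2 = 0)) := by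
  intro N
  induction N with
  | nil => intro l; simp
  | cons a t ih =>
    intro l
    simp only [List.foldl_cons]
    split_ifs with h
    · rw [ih]
      simp only [PySem.Set.mem_add, List.mem_cons]
      constructor
      · rintro ((h1 | h1) | h1)
        · exact Or.inl h1
        · exact Or.inr ⟨Or.inl h1, h1 ▸ h⟩
        · exact Or.inr ⟨Or.inr h1.1, h1.2⟩
      · rintro (h1 | ⟨h1 | h1, h2⟩)
        · exact Or.inl (Or.inl h1)
        · exact Or.inl (Or.inr h1)
        · exact Or.inr ⟨h1, h2⟩
    · rw [ih]
      simp only [List.mem_cons]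
      constructor
      · rintro (h1 | h1)
        · exact Or.inl h1
        · exact Or.inr ⟨Or.inr h1.1, h1.2⟩
      · rintro (h1 | ⟨h1 | h1, h2⟩)
        · exact Or.inl h1
        · exact absurd (h1 ▸ h2) h
        · exact Or.inr ⟨h1, h2⟩

lemma lib_inner_nodup {board : List (List Int)} :
    ∀ (N : List (Int × Int)) (l : PySem.Set (Int × Int)), l.Nodup →
      (N.foldl (fun l q => if boardAt board q.1 q.2 = 0 then PySem.Set.add l q else l) l).Nodup := by
  intro N
  induction N with
  | nil => intro l h; simpa using h
  | cons a t ih =>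
    intro l h
    simp only [List.foldl_cons]
    split_ifs with hc
    · exact ih _ (PySem.Set.nodup_add _ _ h)
    · exact ih _ h

lemma lib_outer_mem {board : List (List Int)} {x : Int × Int} :
    ∀ (L : List (Int × Int)) (l : PySem.Set (Int × Int)),
      (x ∈ L.foldl (fun libs m =>
          (detect_neighbor m.1 m.2).foldl
            (fun l q => if boardAt board q.1 q.2 = 0 then PySem.Set.add l q else l) libs) l ↔
        x ∈ l ∨ (boardAt board x.1 x.2 = 0 ∧ ∃ m ∈ L, x ∈ detect_neighbor m.1 m.2)) := by
  intro L
  induction L with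
  | nil => intro l; simp
  | cons a t ih =>
    intro l
    simp only [List.foldl_cons]
    rw [ih, lib_inner_mem]
    simp only [List.mem_cons]
    constructor
    · rintro ((h1 | ⟨h1, h2⟩) | ⟨h1, m, h2, h3⟩)
      · exact Or.inl h1
      · exact Or.inr ⟨h2, a, Or.inl rfl, h1⟩
      · exact Or.inr ⟨h1, m, Or.inr h2, h3⟩
    · rintro (h1 | ⟨h1, m, h2 | h2, h3⟩)
      · exact Or.inl (Or.inl h1)
      · exact Or.inl (Or.inr ⟨h2 ▸ h3, h1⟩)
      · exact Or.inr ⟨h1, m, h2, h3⟩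

lemma mem_libList {board : List (List Int)} {L : List (Int × Int)} {x : Int × Int} :
    x ∈ libList board L ↔ boardAt board x.1 x.2 = 0 ∧ ∃ m ∈ L, x ∈ detect_neighbor m.1 m.2 := by
  unfold libList
  rw [lib_outer_mem]
  simp [PySem.Set.empty]

lemma nodup_libList {board : List (List Int)} {L : List (Int × Int)} : (libList board L).Nodup := by
  unfold libList
  have hgen : ∀ (L : List (Int × Int)) (l : PySem.Set (Int × Int)), l.Nodup →
      (L.foldl (fun libs m =>
        (detect_neighbor m.1 m.2).foldl
          (fun l q => if boardAt board q.1 q.2 = 0 then PySem.Set.add l q else l) libs) l).Nodup := by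
    intro L
    induction L with
    | nil => intro l h; simpa using h
    | cons a t ih =>
      intro l h
      simp only [List.foldl_cons]
      exact ih _ (lib_inner_nodup _ _ h)
  exact hgen L _ (by simp [PySem.Set.empty])

lemma libList_length_congr {board : List (List Int)} {L1 L2 : List (Int × Int)}
    (h : ∀ y, y ∈ L1 ↔ y ∈ L2) : (libList board L1).length = (libList board L2).length := by
  refine List.Perm.length_eq ?_
  refine (List.perm_ext_iff_of_nodup nodup_libList nodup_libList).2 ?_
  intro a
  rw [mem_libList, mem_libList]
  constructor
  · rintro ⟨h1, m, h2, h3⟩; exact ⟨h1, m, (h m).1 h2, h3⟩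
  · rintro ⟨h1, m, h2, h3⟩; exact ⟨h1, m, (h m).2 h2, h3⟩

lemma ofList_length_of_nodup {l : List (Int × Int)} (h : l.Nodup) :
    (PySem.Set.ofList l).length = l.length := by
  refine List.Perm.length_eq ?_
  exact (List.perm_ext_iff_of_nodup (PySem.Set.nodup_ofList l) h).2
    (fun a => PySem.Set.mem_ofList l a)

lemma get_liberty_positions_eq (i j : Int) (board : List (List Int)) (c : Int) :
    get_liberty_positions i j board c = libList board (all_positions i j board c) := by
  rfl

-- ---- contributions ----
def libCount (board : List (List Int)) (c : Int) (p : Int × Int) : Nat :=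
  (libList board (all_positions p.1 p.2 board c)).length

def contrib (board : List (List Int)) (player k : Int) (p : Int × Int) : Int × Int :=
  (if boardAt board p.1 p.2 = player ∧ ((libCount board player p : Int) ≤ k)
     then (libCount board player p : Int) else 0,
   if boardAt board p.1 p.2 = 3 - player ∧ ((libCount board (3 - player) p : Int) ≤ k)
     then (libCount board (3 - player) p : Int) else 0)

lemma nested_foldl_eq {α β γ : Type} (l1 : List α) (l2 : List β) (F : γ → α × β → γ) (init : γ) :
    l1.foldl (fun s i => l2.foldl (fun s j => F s (i, j)) s) init
      = (l1.flatMap (fun i => l2.map (fun j => (i, j)))).foldl F init := by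
  induction l1 generalizing init with
  | nil => rfl
  | cons a l ih => simp [List.foldl_append, List.foldl_map, ih]

lemma foldl_add_pair {α : Type} (f : α → Int × Int) :
    ∀ (l : List α) (a : Int × Int),
      l.foldl (fun acc x => acc + f x) a = a + (l.map f).sum := by
  intro l
  induction l with
  | nil => simp
  | cons x t ih => intro a; simp [ih, add_assoc]

def A_body (board : List (List Int)) (player k : Int) (acc : Int × Int) (p : Int × Int) :
    Int × Int :=
  let acc :=
    if boardAt board p.1 p.2 = player then
      let lib := get_liberty_positions p.1 p.2 board player
      if ((PySem.Set.ofList lib).length : Int) ≤ k then (acc.1 + (lib.length : Int), acc.2)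
      else acc
    else acc
  if boardAt board p.1 p.2 = 3 - player then
    let lib := get_liberty_positions p.1 p.2 board (3 - player)
    if ((PySem.Set.ofList lib).length : Int) ≤ k then (acc.1, acc.2 + (lib.length : Int))
    else acc
  else acc

lemma liberty_lengths (board : List (List Int)) (c : Int) (p : Int × Int) :
    (get_liberty_positions p.1 p.2 board c).length = libCount board c p ∧
    ((PySem.Set.ofList (get_liberty_positions p.1 p.2 board c)).length = libCount board c p) := by
  constructor
  · rw [get_liberty_positions_eq]; rfl
  · rw [ofList_length_of_nodup (by rw [get_liberty_positions_eq]; exact nodup_libList)]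
    rw [get_liberty_positions_eq]; rfl

lemma A_body_eq (board : List (List Int)) (player k : Int) (acc : Int × Int) (p : Int × Int) :
    A_body board player k acc p = acc + contrib board player k p := by
  obtain ⟨hl1, hl2⟩ := liberty_lengths board player p
  obtain ⟨hl3, hl4⟩ := liberty_lengths board (3 - player) p
  have hpn : player ≠ 3 - player := by omega
  unfold A_body contrib
  simp only [hl1, hl2, hl3, hl4]
  split_ifs <;> simp_all [Prod.ext_iff]

lemma A_eq_sum (board : List (List Int)) (player k : Int) :
    get_group_count_with_k_liberties board player k
      = (gridList.map (contrib board player k)).sum := by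
  have step1 : get_group_count_with_k_liberties board player k
      = gridList.foldl (A_body board player k) (0, 0) := by
    unfold get_group_count_with_k_liberties gridList
    exact nested_foldl_eq _ _ (A_body board player k) _
  rw [step1]
  have hfun : A_body board player k = fun acc p => acc + contrib board player k p := by
    funext acc p; exact A_body_eq board player k acc p
  rw [hfun, foldl_add_pair]
  exact Prod.ext (by simp) (by simp)

-- ---- the sweep (port B) ----
-- reducible so that Finset.filter below finds its Decidable instance structurally
abbrev rel (board : List (List Int)) (player : Int) (p : Int × Int) : Prop :=
  boardAt board p.1 p.2 = player ∨ boardAt board p.1 p.2 = 3 - player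

def T (board : List (List Int)) (player : Int) (rest : List (Int × Int))
    (V : List (Int × Int)) : Finset (Int × Int) :=
  gridFinset.filter (fun x => rel board player x ∧ x ∉ V ∧
    ∃ c ∈ rest, rel board player c ∧ x ∈ all_positions c.1 c.2 board (boardAt board c.1 c.2))

def B_body (board : List (List Int)) (player k : Int)
    (st : PySem.Set (Int × Int) × Int × Int) (p : Int × Int) :
    PySem.Set (Int × Int) × Int × Int :=
  let color := boardAt board p.1 p.2
  if (p.1, p.2) ∈ st.1 then st
  else if color ≠ player ∧ color ≠ 3 - player then st
  else
    let members := flood p.1 p.2 board color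
    let visited' := PySem.Set.update st.1 members
    let libs : PySem.Set (Int × Int) := members.foldl (fun libs m =>
      (neighbors_b m.1 m.2).foldl (fun l q =>
        if boardAt board q.1 q.2 = 0 then PySem.Set.add l q else l) libs) PySem.Set.empty
    if (libs.length : Int) ≤ k then
      if color = player then
        (visited', st.2.1 + (libs.length : Int) * (members.length : Int), st.2.2)
      else (visited', st.2.1, st.2.2 + (libs.length : Int) * (members.length : Int))
    else (visited', st.2.1, st.2.2)

lemma flood_cond_fold (board : List (List Int)) (c : Int) (ally : List (Int × Int)) :
    ∀ (N st : List (Int × Int)),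
      N.foldl (fun st q => if boardAt board q.1 q.2 = c ∧ q ∉ st ∧ q ∉ ally then q :: st else st) st
      = (N.filter (fun q => decide (boardAt board q.1 q.2 = c))).foldl
          (fun st a => if a ∉ st ∧ a ∉ ally then a :: st else st) st := by
  intro N
  induction N with
  | nil => intro st; rfl
  | cons a t ih =>
    intro st
    rw [List.foldl_cons]
    by_cases h : boardAt board a.1 a.2 = c
    · have hf : (a :: t).filter (fun q => decide (boardAt board q.1 q.2 = c))
          = a :: t.filter (fun q => decide (boardAt board q.1 q.2 = c)) := by
        rw [List.filter_cons, if_pos (by simp [h])]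
      rw [hf, List.foldl_cons, ih]
      congr 1
      by_cases h2 : a ∉ st ∧ a ∉ ally
      · rw [if_pos ⟨h, h2.1, h2.2⟩, if_pos h2]
      · rw [if_neg (fun hh => h2 ⟨hh.2.1, hh.2.2⟩), if_neg h2]
    · have hf : (a :: t).filter (fun q => decide (boardAt board q.1 q.2 = c))
          = t.filter (fun q => decide (boardAt board q.1 q.2 = c)) := by
        rw [List.filter_cons, if_neg (by simp [h])]
      rw [hf, ih]
      congr 1
      rw [if_neg (fun hh => h hh.1)]

lemma flood_loop_eq (board : List (List Int)) (c : Int) :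
    ∀ (fuel : Nat) (stack mem : List (Int × Int)),
      flood_loop board c fuel stack mem = all_positions_loop board c fuel stack mem := by
  intro fuel
  induction fuel with
  | zero => intro stack mem; rfl
  | succ fuel ih =>
    intro stack mem
    cases stack with
    | nil => rfl
    | cons p rest =>
      simp only [flood_loop, all_positions_loop]
      rw [neighbors_b_eq, flood_cond_fold, ← detect_neighbor_ally_eq, ih]

lemma flood_eq (i j : Int) (board : List (List Int)) (c : Int) :
    flood i j board c = all_positions i j board c := flood_loop_eq board c 26 [(i, j)] []

lemma T_nil (board : List (List Int)) (player : Int) (V : List (Int × Int)) :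
    T board player [] V = ∅ := by
  unfold T
  apply Finset.filter_false_of_mem
  intro x _
  rintro ⟨_, _, d, hd, _⟩
  simp at hd

lemma sweep_spec (board : List (List Int)) (player k : Int) :
    ∀ (rest : List (Int × Int)), (∀ c ∈ rest, inGrid c) →
    ∀ (V : PySem.Set (Int × Int)) (m o : Int),
      (∀ x ∈ V, inGrid x ∧ rel board player x ∧
        ∀ y ∈ all_positions x.1 x.2 board (boardAt board x.1 x.2), y ∈ V) →
      (rest.foldl (B_body board player k) (V, m, o)).2
      = (m, o) + (T board player rest V).sum (contrib board player k) := by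
  intro rest
  induction rest with
  | nil =>
    intro _ V m o _
    rw [List.foldl_nil, T_nil, Finset.sum_empty]
    exact Prod.ext (by simp) (by simp)
  | cons c rest ih =>
    intro hg V m o HV
    have hgc : inGrid c := hg c (List.mem_cons_self ..)
    have hgrest : ∀ d ∈ rest, inGrid d := fun d hd => hg d (List.mem_cons_of_mem _ hd)
    rw [List.foldl_cons]
    by_cases hcv : (c.1, c.2) ∈ V
    · have hstep : B_body board player k (V, m, o) c = (V, m, o) := by
        unfold B_body; rw [if_pos hcv]
      rw [hstep, ih hgrest V m o HV]
      congr 2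
      unfold T
      apply Finset.filter_congr
      intro x _
      constructor
      · rintro ⟨hrx, hxv, d, hd, hreld, hxd⟩
        exact ⟨hrx, hxv, d, List.mem_cons_of_mem _ hd, hreld, hxd⟩
      · rintro ⟨hrx, hxv, d, hd, hreld, hxd⟩
        rcases List.mem_cons.1 hd with h | h
        · exfalso
          have hcV : c ∈ V := hcv
          rw [h] at hxd
          exact hxv ((HV c hcV).2.2 x hxd)
        · exact ⟨hrx, hxv, d, h, hreld, hxd⟩
    · by_cases hrelc : rel board player c
      case neg =>
        have hstep : B_body board player k (V, m, o) c = (V, m, o) := by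
          unfold B_body
          rw [if_neg hcv, if_pos ⟨fun h => hrelc (Or.inl h), fun h => hrelc (Or.inr h)⟩]
        rw [hstep, ih hgrest V m o HV]
        congr 2
        unfold T
        apply Finset.filter_congr
        intro x _
        constructor
        · rintro ⟨hrx, hxv, d, hd, hreld, hxd⟩
          exact ⟨hrx, hxv, d, List.mem_cons_of_mem _ hd, hreld, hxd⟩
        · rintro ⟨hrx, hxv, d, hd, hreld, hxd⟩
          rcases List.mem_cons.1 hd with h | h
          · rw [h] at hreld
            exact absurd hreld hrelc
          · exact ⟨hrx, hxv, d, h, hreld, hxd⟩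
      case pos =>
        -- the interesting case: flood the whole group of c once
        obtain ⟨hnodupM, hmemM, hgridM⟩ :=
          all_positions_spec (board := board) (c := boardAt board c.1 c.2) hgc
        set col := boardAt board c.1 c.2 with hcoldef
        set M := all_positions c.1 c.2 board col with hMdef
        have hcM : c ∈ M := (hmemM c).2 Relation.ReflTransGen.refl
        have hcolM : ∀ x ∈ M, boardAt board x.1 x.2 = col := fun x hx =>
          (reach_props hgc rfl ((hmemM x).1 hx)).2.1
        have hMcongr : ∀ x ∈ M, ∀ p, p ∈ all_positions x.1 x.2 board col ↔ p ∈ M :=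
          fun x hx => members_congr hgc rfl hx
        have hMV : ∀ x ∈ M, x ∉ V := by
          intro x hx hxv
          have hbx := hcolM x hx
          have hsub := (HV x hxv).2.2
          rw [hbx] at hsub
          exact hcv (hsub c ((hMcongr x hx c).2 hcM))
        have hrelM : ∀ x ∈ M, rel board player x := by
          intro x hx
          have hbx := hcolM x hx
          rcases hrelc with h | h
          · exact Or.inl (hbx.trans h)
          · exact Or.inr (hbx.trans h)
        have HV' : ∀ x ∈ PySem.Set.update V M, inGrid x ∧ rel board player x ∧
            ∀ y ∈ all_positions x.1 x.2 board (boardAt board x.1 x.2),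
              y ∈ PySem.Set.update V M := by
          intro x hx
          rcases (PySem.Set.mem_update ..).1 hx with h | h
          · obtain ⟨hg1, hg2, hg3⟩ := HV x h
            exact ⟨hg1, hg2, fun y hy => (PySem.Set.mem_update ..).2 (Or.inl (hg3 y hy))⟩
          · have hbx := hcolM x h
            refine ⟨hgridM x h, hrelM x h, fun y hy => (PySem.Set.mem_update ..).2 (Or.inr ?_)⟩
            rw [hbx] at hy
            exact (hMcongr x h y).1 hy
        have hTsplit : T board player (c :: rest) V
            = M.toFinset ∪ T board player rest (PySem.Set.update V M) := by
          ext x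
          simp only [T, Finset.mem_union, Finset.mem_filter, List.mem_toFinset]
          constructor
          · rintro ⟨hxg, hrx, hxv, d, hd, hreld, hxd⟩
            by_cases hxM : x ∈ M
            · exact Or.inl hxM
            · rcases List.mem_cons.1 hd with h | h
              · exfalso; rw [h] at hxd; exact hxM hxd
              · refine Or.inr ⟨hxg, hrx, fun hu => ?_, d, h, hreld, hxd⟩
                rcases (PySem.Set.mem_update ..).1 hu with h2 | h2
                · exact hxv h2
                · exact hxM h2
          · rintro (hxM | ⟨hxg, hrx, hxv, d, hd, hreld, hxd⟩)
            · refine ⟨?_, hrelM x hxM, hMV x hxM, c, List.mem_cons_self .., hrelc, hxM⟩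
              unfold gridFinset
              rw [List.mem_toFinset, mem_gridList]
              exact hgridM x hxM
            · exact ⟨hxg, hrx, fun hv => hxv ((PySem.Set.mem_update ..).2 (Or.inl hv)),
                d, List.mem_cons_of_mem _ hd, hreld, hxd⟩
        have hdisj : Disjoint M.toFinset (T board player rest (PySem.Set.update V M)) := by
          rw [Finset.disjoint_left]
          intro x hxM hxT
          simp only [T, Finset.mem_filter, List.mem_toFinset] at hxM hxT
          exact hxT.2.2.1 ((PySem.Set.mem_update ..).2 (Or.inr hxM))
        have hconst : ∀ x ∈ M.toFinset, contrib board player k x = contrib board player k c := by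
          intro x hx
          rw [List.mem_toFinset] at hx
          have hbx := hcolM x hx
          have hlib : ∀ cc : Int, boardAt board x.1 x.2 = cc → boardAt board c.1 c.2 = cc →
              libCount board cc x = libCount board cc c := by
            intro cc hx2 hc2
            unfold libCount
            apply libList_length_congr
            have h1 : cc = col := by rw [← hx2, hbx]
            subst h1
            exact hMcongr x hx
          have hpn : player ≠ 3 - player := by omega
          unfold contrib
          rcases hrelc with hcp | hcp
          · have hxp : boardAt board x.1 x.2 = player := hbx.trans hcp
            rw [hlib player hxp hcp]
            simp only [hxp, hcp]
            have h2x : ¬ (player = 3 - player ∧ ((libCount board (3 - player) x : Int) ≤ k)) :=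
              fun hh => hpn hh.1
            have h2c : ¬ (player = 3 - player ∧ ((libCount board (3 - player) c : Int) ≤ k)) :=
              fun hh => hpn hh.1
            rw [if_neg h2x, if_neg h2c]
          · have hxp : boardAt board x.1 x.2 = 3 - player := hbx.trans hcp
            rw [hlib (3 - player) hxp hcp]
            simp only [hxp, hcp]
            have hpn' : (3 : Int) - player ≠ player := by omega
            have h1x : ¬ ((3 : Int) - player = player ∧ ((libCount board player x : Int) ≤ k)) :=
              fun hh => hpn' hh.1
            have h1c : ¬ ((3 : Int) - player = player ∧ ((libCount board player c : Int) ≤ k)) :=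
              fun hh => hpn' hh.1
            rw [if_neg h1x, if_neg h1c]
        have hsumM : (M.toFinset).sum (contrib board player k)
            = M.length • contrib board player k c := by
          rw [Finset.sum_congr rfl hconst, Finset.sum_const, List.toFinset_card_of_nodup hnodupM]
        -- evaluate the B_body step
        have hlibs : (M.foldl (fun libs mm =>
            (neighbors_b mm.1 mm.2).foldl (fun l q =>
              if boardAt board q.1 q.2 = 0 then PySem.Set.add l q else l) libs)
            PySem.Set.empty) = libList board M := by
          simp only [neighbors_b_eq]; rfl
        have hLc : (libList board M).length = libCount board col c := by
          unfold libCount; rfl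
        have hstep : B_body board player k (V, m, o) c =
            (PySem.Set.update V M,
              (if ((libList board M).length : Int) ≤ k ∧ col = player then
                m + ((libList board M).length : Int) * (M.length : Int) else m),
              (if ((libList board M).length : Int) ≤ k ∧ ¬ col = player then
                o + ((libList board M).length : Int) * (M.length : Int) else o)) := by
          unfold B_body
          rw [if_neg hcv]
          have hnot : ¬ (boardAt board c.1 c.2 ≠ player ∧ boardAt board c.1 c.2 ≠ 3 - player) := by
            rcases hrelc with h | h
            · exact fun hh => hh.1 h
            · exact fun hh => hh.2 h
          rw [if_neg hnot]
          simp only [← hMdef, ← hcoldef, flood_eq, hlibs]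
          by_cases hlk : ((libList board M).length : Int) ≤ k
          · by_cases hcp : col = player
            · rw [if_pos hlk, if_pos hcp, if_pos ⟨hlk, hcp⟩, if_neg (fun h => h.2 hcp)]
            · rw [if_pos hlk, if_neg hcp, if_neg (fun h => hcp h.2), if_pos ⟨hlk, hcp⟩]
          · rw [if_neg hlk, if_neg (fun h => hlk h.1), if_neg (fun h => hlk h.1)]
        rw [hstep, ih hgrest _ _ _ HV', hTsplit, Finset.sum_union hdisj, hsumM]
        -- contrib at c, by branch
        set L : Int := ((libList board M).length : Int) with hLdef
        rcases hrelc with hcp | hcp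
        · have hcpc : col = player := hcp
          have hne' : ¬ (boardAt board c.1 c.2 = 3 - player ∧
              ((libCount board (3 - player) c : Int) ≤ k)) := by
            intro hh
            have : col = 3 - player := hh.1
            rw [hcpc] at this
            omega
          have hlibc : (libCount board player c : Int) = L := by
            rw [hLdef, hLc, ← hcpc]
          have hcontc : contrib board player k c = (if L ≤ k then L else 0, 0) := by
            unfold contrib
            rw [if_neg hne']
            have hpc : boardAt board c.1 c.2 = player ∧ ((libCount board player c : Int) ≤ k)
                ↔ ((libCount board player c : Int) ≤ k) := by
              constructor
              · exact fun hh => hh.2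
              · exact fun hh => ⟨hcp, hh⟩
            by_cases hlk2 : (libCount board player c : Int) ≤ k
            · rw [if_pos (hpc.2 hlk2), hlibc, if_pos (hlibc ▸ hlk2)]
            · rw [if_neg (fun hh => hlk2 (hpc.1 hh)), if_neg (fun hh => hlk2 (hlibc ▸ hh))]
          rw [hcontc]
          by_cases hlk : L ≤ k
          · rw [if_pos ⟨hlk, hcpc⟩, if_neg (fun hh => hh.2 hcpc), if_pos hlk]
            refine Prod.ext ?_ ?_ <;>
              simp [Prod.fst_add, Prod.snd_add, nsmul_eq_mul] <;> ring
          · have hn1 : ¬ (L ≤ k ∧ col = player) := fun hh => hlk hh.1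
            have hn2 : ¬ (L ≤ k ∧ ¬ col = player) := fun hh => hlk hh.1
            rw [if_neg hn1, if_neg hn2, if_neg hlk]
            refine Prod.ext ?_ ?_ <;> simp [nsmul_eq_mul]
        · have hcpc : col = 3 - player := hcp
          have hnp : ¬ col = player := by rw [hcpc]; omega
          have hne' : ¬ (boardAt board c.1 c.2 = player ∧
              ((libCount board player c : Int) ≤ k)) := fun hh => hnp hh.1
          have hlibc : (libCount board (3 - player) c : Int) = L := by
            rw [hLdef, hLc, ← hcpc]
          have hcontc : contrib board player k c = (0, if L ≤ k then L else 0) := by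
            unfold contrib
            rw [if_neg hne']
            by_cases hlk2 : (libCount board (3 - player) c : Int) ≤ k
            · rw [if_pos ⟨hcp, hlk2⟩, hlibc, if_pos (hlibc ▸ hlk2)]
            · rw [if_neg (fun hh => hlk2 hh.2), if_neg (fun hh => hlk2 (hlibc ▸ hh))]
          rw [hcontc]
          by_cases hlk : L ≤ k
          · rw [if_neg (fun hh => hnp hh.2), if_pos ⟨hlk, hnp⟩, if_pos hlk]
            refine Prod.ext ?_ ?_ <;>
              simp [Prod.fst_add, Prod.snd_add, nsmul_eq_mul] <;> ring
          · have hn1 : ¬ (L ≤ k ∧ col = player) := fun hh => hlk hh.1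
            have hn2 : ¬ (L ≤ k ∧ ¬ col = player) := fun hh => hlk hh.1
            rw [if_neg hn1, if_neg hn2, if_neg hlk]
            refine Prod.ext ?_ ?_ <;> simp [nsmul_eq_mul]

lemma B_eq_sum (board : List (List Int)) (player k : Int) :
    get_group_count_with_k_liberties_alt board player k
      = (gridList.map (contrib board player k)).sum := by
  have heq : (fun (st : PySem.Set (Int × Int) × Int × Int) (i : Int) =>
      (PySem.List.pyRange 0 5 1).foldl (fun st j =>
        let color := boardAt board i j
        if (i, j) ∈ st.1 then st
        else if color ≠ player ∧ color ≠ 3 - player then st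
        else
          let members := flood i j board color
          let visited' := PySem.Set.update st.1 members
          let libs : PySem.Set (Int × Int) := members.foldl (fun libs m =>
            (neighbors_b m.1 m.2).foldl (fun l q =>
              if boardAt board q.1 q.2 = 0 then PySem.Set.add l q else l) libs) PySem.Set.empty
          if (libs.length : Int) ≤ k then
            if color = player then
              (visited', st.2.1 + (libs.length : Int) * (members.length : Int), st.2.2)
            else (visited', st.2.1, st.2.2 + (libs.length : Int) * (members.length : Int))
          else (visited', st.2.1, st.2.2)) st)
      = fun st i => (PySem.List.pyRange 0 5 1).foldl
          (fun st j => B_body board player k st (i, j)) st := by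
    funext st i
    congr 1
  have step1 : get_group_count_with_k_liberties_alt board player k
      = (gridList.foldl (B_body board player k) (PySem.Set.empty, (0 : Int), (0 : Int))).2 := by
    unfold get_group_count_with_k_liberties_alt
    rw [heq, nested_foldl_eq _ _ (B_body board player k)]
    unfold gridList
    exact Prod.mk.eta
  rw [step1, sweep_spec board player k gridList (fun c hc => mem_gridList.1 hc)
    PySem.Set.empty 0 0 (by intro x hx; simp [PySem.Set.empty] at hx)]
  have hT : T board player gridList PySem.Set.empty
      = gridFinset.filter (fun x => rel board player x) := by
    ext x
    simp only [T, Finset.mem_filter]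
    constructor
    · rintro ⟨hxg, hrx, _, _⟩; exact ⟨hxg, hrx⟩
    · rintro ⟨hxg, hrx⟩
      have hgx : inGrid x := by
        rw [gridFinset, List.mem_toFinset, mem_gridList] at hxg
        exact hxg
      obtain ⟨_, hmemx, _⟩ := all_positions_spec (board := board)
        (c := boardAt board x.1 x.2) hgx
      exact ⟨hxg, hrx, by simp [PySem.Set.empty], x, mem_gridList.2 hgx, hrx,
        (hmemx x).2 Relation.ReflTransGen.refl⟩
  rw [hT]
  have hsum : (gridFinset.filter (fun x => rel board player x)).sum (contrib board player k)
      = gridFinset.sum (contrib board player k) := by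
    apply Finset.sum_subset (Finset.filter_subset _ _)
    intro x _ hxn
    rw [Finset.mem_filter] at hxn
    have hnr : ¬ rel board player x := by
      intro hr
      exact hxn ⟨by assumption, hr⟩
    unfold contrib
    rw [if_neg (fun h => hnr (Or.inl h.1)), if_neg (fun h => hnr (Or.inr h.1))]
    rfl
  rw [hsum]
  have hlist : gridFinset.sum (contrib board player k)
      = (gridList.map (contrib board player k)).sum := by
    unfold gridFinset
    rw [List.sum_toFinset _ nodup_gridList]
  rw [hlist]
  exact Prod.ext (by simp) (by simp)

-- ===== VERDICT (by name: the statement is the Claim_ definition above) =====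
theorem get_group_count_with_k_liberties_spec : Claim_equal_get_group_count_with_k_liberties := by
  intro board player k _ _
  unfold Spec_get_group_count_with_k_liberties
  rw [A_eq_sum, B_eq_sum]
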